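-- pv_equiv track=rewrite | github.com/kurtmckee/chipshot | src/chipshot/reader/header.py | two_lines
-- ===== SOURCE A (Python) =====
-- import typing as t
--
-- def two_lines(
--     content: str, start: int
-- ) -> t.Generator[tuple[str, str | None, int], None, None]:
--     """Iterate over the content, yielding the current and next lines."""
--
--     if start == len(content):
--         return
--
--     middle = content.find("\n", start + 1)
--     if middle == -1:
--         yield content[start:], None, len(content)
--         return
--     current_line = content[start:middle]
--
--     end = content.find("\n", middle + 1)
--     while end != -1:
--         next_line = content[middle + 1 : end]
--         yield current_line, next_line, middle
--         current_line = next_line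
--         start, middle, end = middle, end, content.find("\n", end + 1)
--
--     next_line = content[middle + 1 :]
--     yield current_line, next_line, middle
--     yield next_line, None, len(content)
-- ===== SOURCE B (Python) =====
-- def two_lines(content, start):
--     """Collect newline boundaries first, then emit adjacent line pairs."""
--     n = len(content)
--     if start == n:
--         return
--     positions = []
--     p = content.find("\n", start + 1)
--     while p != -1:
--         positions.append(p)
--         p = content.find("\n", p + 1)
--     if not positions:
--         yield content[start:], None, n
--         return
--     lines = [content[start:positions[0]]]
--     for i in range(1, len(positions)):
--         lines.append(content[positions[i - 1] + 1 : positions[i]])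
--     lines.append(content[positions[-1] + 1 :])
--     for line, nxt, p in zip(lines, lines[1:], positions):
--         yield line, nxt, p
--     yield lines[-1], None, n
-- ===== Notes on version B (the rewrite author's own statement) =====
-- stated objective: alternative
-- what changed: A streams line pairs with an interleaved sliding-window while-loop (current/next/middle state mutated as it yields); B first collects all newline positions after start+1 into a list, derives the full list of line segments from those boundaries, and then emits the pairs by zipping adjacent lines.
import Mathlib
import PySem

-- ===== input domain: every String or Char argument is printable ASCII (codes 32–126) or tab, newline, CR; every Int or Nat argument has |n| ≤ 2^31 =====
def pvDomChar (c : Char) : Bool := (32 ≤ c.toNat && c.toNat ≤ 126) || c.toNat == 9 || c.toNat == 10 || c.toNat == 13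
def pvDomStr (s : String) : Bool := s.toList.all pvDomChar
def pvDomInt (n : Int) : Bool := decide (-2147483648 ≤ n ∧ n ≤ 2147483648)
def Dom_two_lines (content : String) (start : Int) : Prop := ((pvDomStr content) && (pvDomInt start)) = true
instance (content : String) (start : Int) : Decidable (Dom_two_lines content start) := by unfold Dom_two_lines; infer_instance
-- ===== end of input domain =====

-- B replaces A's interleaved sliding-window yield loop with a collect-then-emit pass
-- (gather all newline positions first, then zip adjacent lines); objective: alternative.

-- ===== PORT A =====
-- A's while loop: state (current_line, middle, end); the two yields after the loop are the
-- e = -1 exit; fuel only bounds the iteration count (proved sufficient below).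
def twoLinesLoopA (cs : List Char) (cur : List Char) (m e : Int)
    (fuel : Nat) : List (String × Option String × Int) :=
    if e = -1 then
      let nxt := PySem.Chars.slice cs (some (m + 1)) none
      [(String.ofList cur, some (String.ofList nxt), m), (String.ofList nxt, none, (cs.length : Int))]
    else
      match fuel with
      | 0 => []
      | fuel + 1 =>
        let nxt := PySem.Chars.slice cs (some (m + 1)) (some e)
        (String.ofList cur, some (String.ofList nxt), m) ::
          twoLinesLoopA cs nxt e (PySem.Chars.findFrom cs ['\n'] (e + 1) none) fuel
termination_by fuel

def two_lines (content : String) (start : Int) : List (String × Option String × Int) :=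
  let cs := content.toList
  if start = (cs.length : Int) then []
  else
    let middle := PySem.Chars.findFrom cs ['\n'] (start + 1) none
    if middle = -1 then
      [(String.ofList (PySem.Chars.slice cs (some start) none), none, (cs.length : Int))]
    else
      let cur := PySem.Chars.slice cs (some start) (some middle)
      twoLinesLoopA cs cur middle (PySem.Chars.findFrom cs ['\n'] (middle + 1) none) cs.length

-- ===== PORT B =====
-- positions-collection loop of Source B (repeated str.find); fuel bounds the iteration count.
def twoLinesCollect (cs : List Char) (p : Int) (fuel : Nat) : List Int :=
    if p = -1 then []
    else
      match fuel with
      | 0 => []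
      | fuel + 1 => p :: twoLinesCollect cs (PySem.Chars.findFrom cs ['\n'] (p + 1) none) fuel
termination_by fuel

def two_lines_alt (content : String) (start : Int) : List (String × Option String × Int) :=
  let cs := content.toList
  let n : Int := cs.length
  if start = n then []
  else
    let ps := twoLinesCollect cs (PySem.Chars.findFrom cs ['\n'] (start + 1) none) (cs.length + 1)
    match ps with
    | [] => [(String.ofList (PySem.Chars.slice cs (some start) none), none, n)]
    | p0 :: rest =>
      -- lines[0] = content[start:ps[0]]; the for-loop over range(1, len(ps)) is the map over
      -- adjacent pairs zip ps ps.tail; lines[-1] = content[ps[-1]+1:]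
      let lines := PySem.Chars.slice cs (some start) (some p0) ::
        (((p0 :: rest).zip rest).map
            (fun ab => PySem.Chars.slice cs (some (ab.1 + 1)) (some ab.2)) ++
          [PySem.Chars.slice cs (some ((p0 :: rest).getLastD 0 + 1)) none])
      ((lines.zip lines.tail).zip (p0 :: rest)).map
          (fun x => (String.ofList x.1.1, some (String.ofList x.1.2), x.2)) ++
        [(String.ofList (lines.getLastD []), none, n)]

-- ===== PRECONDITION & SPEC =====
def Spec_two_lines (content : String) (start : Int) (out : List (String × Option String × Int)) : Prop := out = two_lines_alt content start
instance (content : String) (start : Int) (out : List (String × Option String × Int)) : Decidable (Spec_two_lines content start out) := by unfold Spec_two_lines; infer_instance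

-- ===== CLAIM (what is proved, stated in full; the proofs are below) =====
def Claim_equal_two_lines : Prop := ∀ (content : String) (start : Int), Dom_two_lines content start → Spec_two_lines content start (two_lines content start)

-- ===== LEMMAS AND PROOFS =====

-- Common intermediate: emit the output tuples from the remaining newline positions.
def pvEmit (cs : List Char) (cur : List Char) (m : Int) :
    List Int → List (String × Option String × Int)
  | [] =>
    let nxt := PySem.Chars.slice cs (some (m + 1)) none
    [(String.ofList cur, some (String.ofList nxt), m), (String.ofList nxt, none, (cs.length : Int))]
  | e :: ps =>
    let nxt := PySem.Chars.slice cs (some (m + 1)) (some e)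
    (String.ofList cur, some (String.ofList nxt), m) :: pvEmit cs nxt e ps

-- Common intermediate: the line segments after the first one.
def pvSegs (cs : List Char) (m : Int) : List Int → List (List Char)
  | [] => [PySem.Chars.slice cs (some (m + 1)) none]
  | e :: ps => PySem.Chars.slice cs (some (m + 1)) (some e) :: pvSegs cs e ps

theorem pvGetLastD_cons_cons {α : Type} (a b : α) (l : List α) (d : α) :
    (a :: b :: l).getLastD d = (b :: l).getLastD d := by
  induction l generalizing a b with
  | nil => rfl
  | cons c l ih => simpa using ih b c

theorem pvSegs_eq (cs : List Char) : ∀ (ps : List Int) (m : Int),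
    ((m :: ps).zip ps).map (fun ab => PySem.Chars.slice cs (some (ab.1 + 1)) (some ab.2)) ++
        [PySem.Chars.slice cs (some ((m :: ps).getLastD 0 + 1)) none] =
      pvSegs cs m ps := by
  intro ps
  induction ps with
  | nil => intro m; simp [pvSegs]
  | cons e ps ih =>
    intro m
    simp only [List.zip_cons_cons, List.map_cons, List.cons_append, pvSegs]
    rw [pvGetLastD_cons_cons m e ps 0]
    rw [ih e]

theorem pvEmit_eq_zip (cs : List Char) : ∀ (ps : List Int) (cur : List Char) (m : Int),
    pvEmit cs cur m ps =
      ((((cur :: pvSegs cs m ps).zip (cur :: pvSegs cs m ps).tail).zip (m :: ps)).map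
          (fun x => (String.ofList x.1.1, some (String.ofList x.1.2), x.2)) ++
        [(String.ofList ((cur :: pvSegs cs m ps).getLastD []), none, (cs.length : Int))]) := by
  intro ps
  induction ps with
  | nil => intro cur m; simp [pvEmit, pvSegs]
  | cons e ps ih =>
    intro cur m
    simp only [pvEmit, pvSegs]
    rw [ih (PySem.Chars.slice cs (some (m + 1)) (some e)) e]
    simp only [pvSegs, List.tail_cons, List.zip_cons_cons, List.map_cons, List.cons_append,
      List.getLastD_cons]

theorem pvFindFrom_unfold (s sub : List Char) (st : Int) :
    PySem.Chars.findFrom s sub st none =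
      (fun c : Int => if (s.length : Int) < c then -1
          else if PySem.Chars.find (s.drop c.toNat) sub = -1 then -1
          else c + PySem.Chars.find (s.drop c.toNat) sub)
        (if st < 0 then (if st + s.length < 0 then (0:Int) else st + s.length) else st) := by
  unfold PySem.Chars.findFrom
  split_ifs <;> simp_all <;> (rw [if_neg (by omega : ¬ (st + (s.length:Int) < 0))]) <;>
    split_ifs <;> first | rfl | omega

-- Any non-(-1) result of str.find is ≥ 0 and points at an occurrence of sub.
theorem pvFindFrom_mem (s sub : List Char) (st : Int)
    (h : PySem.Chars.findFrom s sub st none ≠ -1) :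
    0 ≤ PySem.Chars.findFrom s sub st none ∧
      sub <+: s.drop (PySem.Chars.findFrom s sub st none).toNat := by
  rw [pvFindFrom_unfold] at *
  set c : Int := (if st < 0 then (if st + s.length < 0 then (0:Int) else st + s.length) else st) with hc
  have hc0 : 0 ≤ c := by rw [hc]; split_ifs <;> omega
  simp only [] at h ⊢
  split_ifs at h ⊢ with g1 g2
  · exact absurd rfl h
  · exact absurd rfl h
  · have hr : 0 ≤ PySem.Chars.find (s.drop c.toNat) sub := by
      have := PySem.Chars.neg_one_le_find (s.drop c.toNat) sub
      omega
    refine ⟨by omega, ?_⟩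
    have hsp := (PySem.Chars.find_spec hr).1
    rw [List.drop_drop] at hsp
    have heq : c.toNat + (PySem.Chars.find (s.drop c.toNat) sub).toNat
        = (c + PySem.Chars.find (s.drop c.toNat) sub).toNat := by omega
    rwa [heq] at hsp

-- The loop invariant: e is -1 or a newline position with enough fuel left.
theorem pvLoopA_eq (cs : List Char) : ∀ (fuel : Nat) (cur : List Char) (m e : Int),
    (e ≠ -1 → 0 ≤ e ∧ ['\n'] <+: cs.drop e.toNat ∧ (cs.drop e.toNat).count '\n' ≤ fuel) →
    twoLinesLoopA cs cur m e fuel = pvEmit cs cur m (twoLinesCollect cs e fuel) := by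
  intro fuel
  induction fuel with
  | zero =>
    intro cur m e he
    by_cases h : e = -1
    · simp [twoLinesLoopA, twoLinesCollect, h, pvEmit]
    · obtain ⟨h0, hpre, hcnt⟩ := he h
      obtain ⟨t, ht⟩ := hpre
      exfalso
      have : 1 ≤ (cs.drop e.toNat).count '\n' := by
        rw [← ht]; simp
      omega
  | succ fuel ih =>
    intro cur m e he
    by_cases h : e = -1
    · simp [twoLinesLoopA, twoLinesCollect, h, pvEmit]
    · obtain ⟨h0, hpre, hcnt⟩ := he h
      obtain ⟨t, ht⟩ := hpre
      have hlt : e.toNat < cs.length := by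
        have hne : cs.drop e.toNat ≠ [] := by rw [← ht]; simp
        have hlen : ¬ cs.length ≤ e.toNat := fun hl => hne (List.drop_eq_nil_iff.mpr hl)
        omega
      have hdropsucc : cs.drop (e.toNat + 1) = t := by
        have h1 : cs.drop (e.toNat + 1) = (cs.drop e.toNat).drop 1 := by
          rw [List.drop_drop]
        rw [h1, ← ht]; simp
      rw [twoLinesLoopA, twoLinesCollect]
      simp only [h, if_false]
      rw [pvEmit]
      have hcast : e + 1 = ((e.toNat + 1 : Nat) : Int) := by omega
      set e' := PySem.Chars.findFrom cs ['\n'] (e + 1) none with he'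
      have hrec : twoLinesLoopA cs (PySem.Chars.slice cs (some (m + 1)) (some e)) e e' fuel =
          pvEmit cs (PySem.Chars.slice cs (some (m + 1)) (some e)) e (twoLinesCollect cs e' fuel) := by
        apply ih
        intro hne
        rw [he', hcast] at hne ⊢
        have hk : e.toNat + 1 ≤ cs.length := by omega
        obtain ⟨hge, hp, _⟩ := PySem.Chars.findFrom_natCast_spec cs ['\n'] (e.toNat + 1) hk hne
        refine ⟨by omega, hp, ?_⟩
        set f := PySem.Chars.findFrom cs ['\n'] ((e.toNat + 1 : Nat) : Int) none with hf
        have hmono : (cs.drop f.toNat).count '\n' ≤ (cs.drop (e.toNat + 1)).count '\n' := by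
          have hsub : List.Sublist (cs.drop f.toNat) (cs.drop (e.toNat + 1)) := by
            have h2 : cs.drop f.toNat = (cs.drop (e.toNat + 1)).drop (f.toNat - (e.toNat + 1)) := by
              rw [List.drop_drop]
              congr 1
              omega
            rw [h2]
            exact List.drop_sublist _ _
          exact List.Sublist.count_le '\n' hsub
        have hone : (cs.drop e.toNat).count '\n' = (cs.drop (e.toNat + 1)).count '\n' + 1 := by
          rw [hdropsucc, ← ht]
          simp
        omega
      rw [hrec]

-- ===== VERDICT (by name: the statement is the Claim_ definition above) =====
theorem two_lines_spec : Claim_equal_two_lines := by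
  intro content start _
  unfold Spec_two_lines two_lines two_lines_alt
  set cs := content.toList with hcs
  by_cases hstart : start = (cs.length : Int)
  · simp [hstart]
  · simp only [hstart, if_false]
    set m0 := PySem.Chars.findFrom cs ['\n'] (start + 1) none with hm0
    by_cases hm : m0 = -1
    · simp [hm, twoLinesCollect]
    · simp only [hm, if_false]
      obtain ⟨h0, hpre⟩ := pvFindFrom_mem cs ['\n'] (start + 1) (hm0 ▸ hm)
      rw [← hm0] at h0 hpre
      have hcol : twoLinesCollect cs m0 (cs.length + 1) =
          m0 :: twoLinesCollect cs (PySem.Chars.findFrom cs ['\n'] (m0 + 1) none) cs.length := by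
        rw [twoLinesCollect]
        simp [hm]
      rw [hcol]
      have hinv : (PySem.Chars.findFrom cs ['\n'] (m0 + 1) none ≠ -1 →
          0 ≤ PySem.Chars.findFrom cs ['\n'] (m0 + 1) none ∧
          ['\n'] <+: cs.drop (PySem.Chars.findFrom cs ['\n'] (m0 + 1) none).toNat ∧
          (cs.drop (PySem.Chars.findFrom cs ['\n'] (m0 + 1) none).toNat).count '\n' ≤ cs.length) := by
        intro hne
        obtain ⟨t, ht⟩ := hpre
        have hlt : m0.toNat < cs.length := by
          have hne2 : cs.drop m0.toNat ≠ [] := by rw [← ht]; simp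
          have hlen : ¬ cs.length ≤ m0.toNat := fun hl => hne2 (List.drop_eq_nil_iff.mpr hl)
          omega
        have hcast : m0 + 1 = ((m0.toNat + 1 : Nat) : Int) := by omega
        rw [hcast] at hne ⊢
        have hk : m0.toNat + 1 ≤ cs.length := by omega
        obtain ⟨hge, hp, _⟩ := PySem.Chars.findFrom_natCast_spec cs ['\n'] (m0.toNat + 1) hk hne
        refine ⟨by omega, hp, ?_⟩
        calc (cs.drop (PySem.Chars.findFrom cs ['\n'] ((m0.toNat + 1 : Nat) : Int) none).toNat).count '\n'
            ≤ (cs.drop (PySem.Chars.findFrom cs ['\n'] ((m0.toNat + 1 : Nat) : Int) none).toNat).length :=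
              List.count_le_length
          _ ≤ cs.length := by simp
      rw [pvLoopA_eq cs cs.length (PySem.Chars.slice cs (some start) (some m0)) m0
        (PySem.Chars.findFrom cs ['\n'] (m0 + 1) none) hinv]
      rw [pvEmit_eq_zip cs _ (PySem.Chars.slice cs (some start) (some m0)) m0]
      rw [← pvSegs_eq cs (twoLinesCollect cs (PySem.Chars.findFrom cs ['\n'] (m0 + 1) none) cs.length) m0]
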